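-- pv_equiv track=rewrite | github.com/xCiaraG/Kattis | glitchbot.py | determine_location
-- ===== SOURCE A (Python) =====
-- def determine_location(directions):
-- 	x, y = 0, 0
-- 	position = 0
-- 	for direction in directions:
-- 		if direction == "Right":
-- 			position += 1
-- 			position = position % 4
-- 		elif direction == "Left":
-- 			position += 3
-- 			position = position % 4
-- 		elif position == 0:
-- 			y += 1
-- 		elif position == 1:
-- 			x += 1
-- 		elif position == 2:
-- 			y -= 1
-- 		else:
-- 			x -= 1
-- 	return x, y
-- ===== SOURCE B (Python) =====
-- def determine_location(directions):
--     # No heading state: scan backwards; a turn rotates the whole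
--     # displacement accumulated from the later commands, a move always
--     # contributes (0, 1) in the current frame.
--     x, y = 0, 0
--     for d in reversed(directions):
--         if d == "Right":
--             x, y = y, -x
--         elif d == "Left":
--             x, y = -y, x
--         else:
--             y += 1
--     return x, y
-- ===== Notes on version B (the rewrite author's own statement) =====
-- stated objective: alternative
-- what changed: Eliminates the heading state entirely: B scans the commands back-to-front, every move contributes the fixed vector (0,1), and each turn rotates the displacement accumulated from the later commands, instead of A's forward pass maintaining a mod-4 heading with a 4-way decode branch.
import Mathlib
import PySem

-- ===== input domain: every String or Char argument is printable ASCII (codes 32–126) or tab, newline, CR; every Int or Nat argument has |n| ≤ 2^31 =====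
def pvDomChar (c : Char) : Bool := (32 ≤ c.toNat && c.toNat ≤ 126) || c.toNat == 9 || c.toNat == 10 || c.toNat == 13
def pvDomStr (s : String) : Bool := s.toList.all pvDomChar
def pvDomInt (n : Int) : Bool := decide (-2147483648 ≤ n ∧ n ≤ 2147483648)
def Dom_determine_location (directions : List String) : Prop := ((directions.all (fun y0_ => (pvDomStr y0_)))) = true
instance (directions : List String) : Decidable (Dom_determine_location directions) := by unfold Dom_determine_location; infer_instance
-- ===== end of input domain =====

-- B removes the heading state: it folds the command list from the back, rotating the
-- accumulated displacement on turns instead of maintaining a mod-4 heading (alternative).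


-- ===== PORT A =====
def stepA (s : Int × Int × Int) (d : String) : Int × Int × Int :=
  let (x, y, p) := s
  if d = "Right" then (x, y, (p + 1) % 4)
  else if d = "Left" then (x, y, (p + 3) % 4)
  else if p = 0 then (x, y + 1, p)
  else if p = 1 then (x + 1, y, p)
  else if p = 2 then (x, y - 1, p)
  else (x - 1, y, p)

def determine_location (directions : List String) : Int × Int :=
  let s := directions.foldl stepA (0, 0, 0)
  (s.1, s.2.1)

-- ===== PORT B =====
-- Source B's loop over reversed(directions) is exactly a right fold over the list.
def stepB (d : String) (s : Int × Int) : Int × Int :=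
  let (x, y) := s
  if d = "Right" then (y, -x)
  else if d = "Left" then (-y, x)
  else (x, y + 1)

def determine_location_alt (directions : List String) : Int × Int :=
  directions.foldr stepB (0, 0)

-- ===== PRECONDITION & SPEC =====
def Spec_determine_location (directions : List String) (out : Int × Int) : Prop := out = determine_location_alt directions
instance (directions : List String) (out : Int × Int) : Decidable (Spec_determine_location directions out) := by unfold Spec_determine_location; infer_instance

-- ===== CLAIM =====
def Claim_equal_determine_location : Prop := ∀ (directions : List String), Dom_determine_location directions → Spec_determine_location directions (determine_location directions)

-- ===== LEMMAS AND PROOFS =====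

-- rotate a displacement by heading p quarter-turns clockwise
def rotp (p : Int) (v : Int × Int) : Int × Int :=
  if p = 0 then (v.1, v.2)
  else if p = 1 then (v.2, -v.1)
  else if p = 2 then (-v.1, -v.2)
  else (-v.2, v.1)

theorem fold_agree (l : List String) :
    ∀ (x y p : Int), (p = 0 ∨ p = 1 ∨ p = 2 ∨ p = 3) →
      ((l.foldl stepA (x, y, p)).1, (l.foldl stepA (x, y, p)).2.1)
        = (x + (rotp p (l.foldr stepB (0, 0))).1, y + (rotp p (l.foldr stepB (0, 0))).2) := by
  induction l with
  | nil =>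
    intro x y p hp
    rcases hp with rfl | rfl | rfl | rfl <;> simp [rotp]
  | cons d t ih =>
    intro x y p hp
    simp only [List.foldl_cons, List.foldr_cons]
    rcases hp with rfl | rfl | rfl | rfl <;>
      by_cases hR : d = "Right" <;> by_cases hL : d = "Left" <;>
      norm_num [stepA, stepB, hR, hL] <;>
      first
        | (have h := ih x y 0 (by norm_num); simp [rotp, Prod.ext_iff] at h ⊢; omega)
        | (have h := ih x y 1 (by norm_num); simp [rotp, Prod.ext_iff] at h ⊢; omega)
        | (have h := ih x y 2 (by norm_num); simp [rotp, Prod.ext_iff] at h ⊢; omega)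
        | (have h := ih x y 3 (by norm_num); simp [rotp, Prod.ext_iff] at h ⊢; omega)
        | (have h := ih x (y+1) 0 (by norm_num); simp [rotp, Prod.ext_iff] at h ⊢; omega)
        | (have h := ih (x+1) y 1 (by norm_num); simp [rotp, Prod.ext_iff] at h ⊢; omega)
        | (have h := ih x (y-1) 2 (by norm_num); simp [rotp, Prod.ext_iff] at h ⊢; omega)
        | (have h := ih (x-1) y 3 (by norm_num); simp [rotp, Prod.ext_iff] at h ⊢; omega)

-- ===== VERDICT =====
theorem determine_location_spec : Claim_equal_determine_location := by
  intro directions _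
  unfold Spec_determine_location determine_location determine_location_alt
  have := fold_agree directions 0 0 0 (by norm_num)
  simpa using this
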